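-- pv_equiv track=rewrite | github.com/minte9/algorithms-pages | main/permutations/permutations/permutations_repetition.py | get_permutations_r
-- ===== SOURCE A (Python) =====
-- def get_permutations_r(str, k, prefix=''):
--
--     if k == 0:
--         return [prefix] # Base case
--
--     P = []
--     for c in str:
--         new_perm = get_permutations_r(str, k-1, prefix + c) # Recursive vase
--         P.extend(new_perm)
--
--     return P
-- ===== SOURCE B (Python) =====
-- def get_permutations_r(str, k, prefix=''):
--     result = [prefix]
--     for _ in range(k):
--         result = [p + c for p in result for c in str]
--     return result
-- ===== Notes on version B (the rewrite author's own statement) =====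
-- stated objective: simpler
-- what changed: Replaces the depth-first recursion with an iterative layer-by-layer build: start from [prefix] and k times expand every partial string by each character of str.
-- outside the precondition, e.g. on get_permutations_r('', -1, ''): A returns [], B returns ['']
import Mathlib
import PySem

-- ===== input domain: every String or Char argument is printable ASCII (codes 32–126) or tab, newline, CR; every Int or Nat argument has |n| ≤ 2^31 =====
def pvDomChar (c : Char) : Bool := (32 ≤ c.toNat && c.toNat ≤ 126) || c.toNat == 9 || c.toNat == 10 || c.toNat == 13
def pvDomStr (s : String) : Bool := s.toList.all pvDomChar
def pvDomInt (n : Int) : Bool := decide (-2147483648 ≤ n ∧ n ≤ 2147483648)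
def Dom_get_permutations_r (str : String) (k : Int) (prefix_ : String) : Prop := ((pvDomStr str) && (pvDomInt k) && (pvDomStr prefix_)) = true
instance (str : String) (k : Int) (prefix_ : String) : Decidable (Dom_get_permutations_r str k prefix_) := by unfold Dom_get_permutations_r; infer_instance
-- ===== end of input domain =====

-- B replaces A's depth-first recursion by an iterative layer-by-layer build (same output, same order);
-- equivalence is claimed on k ≥ 0, where the Python A terminates without unbounded recursion.

-- ===== PORT A =====
-- A recurses on k; on Pre_ (0 ≤ k) the test 'k == 0' coincides with the fuel k.toNat reaching 0,
-- so the recursion is transcribed as structural recursion on k.toNat.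
def get_permutations_r_go (str : String) (n : Nat) (prefix_ : String) : List String :=
  match n with
  | 0 => [prefix_]                                  -- base case: return [prefix]
  | Nat.succ m =>                                   -- P = []; for c in str: P.extend(recurse(k-1, prefix+c))
      str.toList.foldl (fun P c => P ++ get_permutations_r_go str m (prefix_ ++ String.mk [c])) []

def get_permutations_r (str : String) (k : Int) (prefix_ : String) : List String :=
  get_permutations_r_go str k.toNat prefix_

-- ===== PORT B =====
-- result = [prefix]; for _ in range(k): result = [p + c for p in result for c in str]
def get_permutations_r_alt (str : String) (k : Int) (prefix_ : String) : List String :=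
  (List.range k.toNat).foldl
    (fun result _ => result.flatMap (fun p => str.toList.map (fun c => p ++ String.mk [c])))
    [prefix_]

-- ===== PRECONDITION & SPEC =====
-- For k < 0 the Python A recurses without bound (RecursionError) except when str is empty,
-- where its [] is an accident of the empty loop; negative k is outside the natural domain.
def Pre_get_permutations_r (str : String) (k : Int) (prefix_ : String) : Prop := 0 ≤ k
instance (str : String) (k : Int) (prefix_ : String) : Decidable (Pre_get_permutations_r str k prefix_) := by unfold Pre_get_permutations_r; infer_instance
def pvWitness_get_permutations_r : String × Int × String := ("ab", 2, "")

def Spec_get_permutations_r (str : String) (k : Int) (prefix_ : String) (out : List String) : Prop := out = get_permutations_r_alt str k prefix_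
instance (str : String) (k : Int) (prefix_ : String) (out : List String) : Decidable (Spec_get_permutations_r str k prefix_ out) := by unfold Spec_get_permutations_r; infer_instance

-- ===== CLAIM (what is proved, stated in full; the proofs are below) =====
def Claim_equal_get_permutations_r : Prop := ∀ (str : String) (k : Int) (prefix_ : String), Dom_get_permutations_r str k prefix_ → Pre_get_permutations_r str k prefix_ → Spec_get_permutations_r str k prefix_ (get_permutations_r str k prefix_)

-- ===== LEMMAS AND PROOFS =====

-- one B-layer of expansion
def pvStep (str : String) (L : List String) : List String :=
  L.flatMap (fun p => str.toList.map (fun c => p ++ String.mk [c]))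

-- A's fold-with-extend is a flatMap over the characters
theorem goA_succ (str : String) (m : Nat) (prefix_ : String) :
    get_permutations_r_go str (m + 1) prefix_
      = str.toList.flatMap (fun c => get_permutations_r_go str m (prefix_ ++ String.mk [c])) := by
  show str.toList.foldl _ [] = _
  rw [PySem.List.foldl_append_eq_flatMap]
  simp

-- n layers applied to any frontier L equal the flatMap of A's recursion over L
theorem step_iter_eq (str : String) (n : Nat) :
    ∀ L : List String, (pvStep str)^[n] L = L.flatMap (fun p => get_permutations_r_go str n p) := by
  induction n with
  | zero => intro L; simp [get_permutations_r_go]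
  | succ m ih =>
      intro L
      rw [Function.iterate_succ_apply, ih]
      simp only [pvStep, List.flatMap_assoc]
      congr 1
      funext p
      rw [goA_succ]
      simp [List.flatMap_map]

-- B's foldl over range is the n-fold iterate of the layer step
theorem foldl_range_step (str : String) (n : Nat) (L : List String) :
    (List.range n).foldl (fun result _ => pvStep str result) L = (pvStep str)^[n] L := by
  induction n generalizing L with
  | zero => simp
  | succ m ih =>
      rw [List.range_succ_eq_map]
      simp only [List.foldl_cons, List.foldl_map]
      rw [ih, ← Function.iterate_succ_apply]

-- ===== VERDICT (by name: the statement is the Claim_ definition above) =====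
theorem get_permutations_r_spec : Claim_equal_get_permutations_r := by
  intro str k prefix_ _ _
  show get_permutations_r str k prefix_ = get_permutations_r_alt str k prefix_
  unfold get_permutations_r get_permutations_r_alt
  rw [show (fun (result : List String) (_ : Nat) =>
        result.flatMap (fun p => str.toList.map (fun c => p ++ String.mk [c])))
      = fun result _ => pvStep str result from rfl]
  rw [foldl_range_step, step_iter_eq]
  simp
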